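-- pv_equiv track=rewrite | github.com/jiisloth/MuumiKakkuSimulaattori | main.py | calculate_tactical_score
-- ===== SOURCE A (Python) =====
-- def calculate_tactical_score(cake):
--     #Could be much better...
--     score = 0
--     for x, line in enumerate(cake):
--         if 0 < x < len(cake):
--             for y, spot in enumerate(line):
--                 candies = [1,2,3,4,5,6,7]
--                 if spot == 0:
--                     for s in [cake[x][y - 1], cake[x+1][y], cake[x-1][y]]:
--                         if s not in candies:
--                             score += 1
--                         else:
--                             candies.remove(s)
--     return score
-- ===== SOURCE B (Python) =====
-- def calculate_tactical_score(cake):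
--     # Candy-centric: for each empty cell, each candy value 1..7 present among the
--     # three neighbors cancels one of the 3 potential points.
--     return sum(
--         3 - sum(v in (row[y - 1], below[y], above[y]) for v in range(1, 8))
--         for above, row, below in zip(cake, cake[1:], cake[2:])
--         for y, s in enumerate(row) if s == 0)
-- ===== Notes on version B (the rewrite author's own statement) =====
-- stated objective: alternative
-- what changed: A's stateful row-index scan with a mutable score and a per-cell consume-once candies list (membership test + list.remove) is replaced by a single sum expression over zip-windows of three consecutive rows, scoring each empty cell candy-centrically as 3 minus the number of candy values 1..7 present among its neighbors; the constant-factor win comes from dropping the per-cell list allocation/removal churn.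
-- crash fix: On grids whose last row contains a 0 (and all earlier rows' zeros have in-range neighbors) A raises IndexError at cake[x+1]; B's window iteration never reaches past the grid and returns the score of the interior rows. — e.g. on calculate_tactical_score([[1], [0]]): A raises IndexError, B returns 0
import Mathlib
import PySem

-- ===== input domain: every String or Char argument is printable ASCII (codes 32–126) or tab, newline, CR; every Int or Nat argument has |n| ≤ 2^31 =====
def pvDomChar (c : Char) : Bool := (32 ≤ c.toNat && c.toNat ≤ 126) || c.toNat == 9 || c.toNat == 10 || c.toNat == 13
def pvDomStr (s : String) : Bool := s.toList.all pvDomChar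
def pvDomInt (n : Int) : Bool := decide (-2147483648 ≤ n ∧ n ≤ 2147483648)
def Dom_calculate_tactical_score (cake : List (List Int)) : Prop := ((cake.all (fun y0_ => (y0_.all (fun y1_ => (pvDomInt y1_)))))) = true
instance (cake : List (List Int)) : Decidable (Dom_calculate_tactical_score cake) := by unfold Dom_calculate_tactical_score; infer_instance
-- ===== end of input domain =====

-- B replaces A's row-index scan with mutable score and a consume-once candies list by a
-- single sum over zip-windows of three consecutive rows, scoring each empty cell as
-- 3 minus the number of candy values 1..7 present among its neighbors (alternative).

-- ===== PORT A =====
def calculate_tactical_score (cake : List (List Int)) : Int :=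
  (PySem.List.enumerate cake).foldl (fun score xl =>
    if 0 < xl.1 ∧ xl.1 < (cake.length : Int) then
      (PySem.List.enumerate xl.2).foldl (fun score ys =>
        let candies : List Int := [1, 2, 3, 4, 5, 6, 7]
        if ys.2 = 0 then
          (([PySem.List.pyGetD (PySem.List.pyGetD cake xl.1 []) (ys.1 - 1) 0,
             PySem.List.pyGetD (PySem.List.pyGetD cake (xl.1 + 1) []) ys.1 0,
             PySem.List.pyGetD (PySem.List.pyGetD cake (xl.1 - 1) []) ys.1 0] : List Int).foldl
            (fun sc s =>
              if s ∉ sc.2 then (sc.1 + 1, sc.2)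
              else (sc.1, (PySem.List.remove? sc.2 s).getD sc.2))
            (score, candies)).1
        else score) score
    else score) 0

-- ===== PORT B =====
-- zip(cake, cake[1:], cake[2:]) is ported as nested pairs (above, (row, below)).
def calculate_tactical_score_alt (cake : List (List Int)) : Int :=
  ((cake.zip ((PySem.List.slice cake (some 1) none).zip (PySem.List.slice cake (some 2) none))).map
    (fun w =>
      (((PySem.List.enumerate w.2.1).filter (fun ys => ys.2 == 0)).map (fun ys =>
        (3 : Int) - ((PySem.List.pyRange 1 8 1).map (fun v =>
            if v ∈ ([PySem.List.pyGetD w.2.1 (ys.1 - 1) 0,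
                     PySem.List.pyGetD w.2.2 ys.1 0,
                     PySem.List.pyGetD w.1 ys.1 0] : List Int) then (1 : Int) else 0)).sum)).sum)).sum

-- ===== PRECONDITION & SPEC =====
-- Pre_ excludes exactly the inputs on which the Python A raises IndexError: a 0 in a
-- scanned row whose neighbor access cake[x+1][y] or cake[x-1][y] is out of range.
def Pre_calculate_tactical_score (cake : List (List Int)) : Prop :=
  ∀ x : Nat, x < cake.length → 0 < x →
    ∀ y : Nat, y < (cake.getD x []).length →
      (cake.getD x []).getD y 1 = 0 →
        x + 1 < cake.length ∧ y < (cake.getD (x + 1) []).length ∧ y < (cake.getD (x - 1) []).length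
instance (cake : List (List Int)) : Decidable (Pre_calculate_tactical_score cake) := by
  unfold Pre_calculate_tactical_score; infer_instance

def pvWitness_calculate_tactical_score : List (List Int) := [[1, 2], [0, 0], [3, 4]]

-- On grids whose last row contains a 0 (while every zero of an earlier scanned row has
-- in-range neighbors) A raises IndexError at cake[x+1]; B's window iteration never
-- reaches past the grid and returns the score of the interior rows.
def Raises_calculate_tactical_score (cake : List (List Int)) : Prop :=
  2 ≤ cake.length ∧ (0 : Int) ∈ cake.getD (cake.length - 1) [] ∧
  ∀ x : Nat, x < cake.length → 1 ≤ x ∧ x + 1 < cake.length →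
    ∀ y : Nat, y < (cake.getD x []).length →
      (cake.getD x []).getD y 1 = 0 →
        y < (cake.getD (x + 1) []).length ∧ y < (cake.getD (x - 1) []).length
instance (cake : List (List Int)) : Decidable (Raises_calculate_tactical_score cake) := by
  unfold Raises_calculate_tactical_score; infer_instance

def pvRaiseWitness_calculate_tactical_score : List (List Int) := [[1], [0]]
def pvRaiseWitnessOut_calculate_tactical_score : Int := 0

def Spec_calculate_tactical_score (cake : List (List Int)) (out : Int) : Prop := out = calculate_tactical_score_alt cake
instance (cake : List (List Int)) (out : Int) : Decidable (Spec_calculate_tactical_score cake out) := by unfold Spec_calculate_tactical_score; infer_instance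

-- ===== CLAIM (what is proved, stated in full; the proofs are below) =====
def Claim_equal_calculate_tactical_score : Prop := ∀ (cake : List (List Int)), Dom_calculate_tactical_score cake → Pre_calculate_tactical_score cake → Spec_calculate_tactical_score cake (calculate_tactical_score cake)
def Claim_raises_calculate_tactical_score : Prop := (∀ (cake : List (List Int)), Dom_calculate_tactical_score cake → Raises_calculate_tactical_score cake → ¬ Pre_calculate_tactical_score cake) ∧ (Dom_calculate_tactical_score (pvRaiseWitness_calculate_tactical_score) ∧ Raises_calculate_tactical_score (pvRaiseWitness_calculate_tactical_score) ∧ calculate_tactical_score_alt (pvRaiseWitness_calculate_tactical_score) = pvRaiseWitnessOut_calculate_tactical_score)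

-- ===== LEMMAS AND PROOFS =====

-- the common per-cell value: 3 minus the number of candies 1..7 among the neighbors
def pvCell (a b c : Int) : Int :=
  3 - ((([1, 2, 3, 4, 5, 6, 7] : List Int).filter (fun v => decide (v ∈ ([a, b, c] : List Int)))).length : Int)

-- the common per-row value: sum of pvCell over the empty spots of row
def pvRow (above row below : List Int) : Int :=
  (((PySem.List.enumerate row).filter (fun ys => ys.2 == 0)).map (fun ys =>
    pvCell (PySem.List.pyGetD row (ys.1 - 1) 0) (PySem.List.pyGetD below ys.1 0)
      (PySem.List.pyGetD above ys.1 0))).sum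

-- the consume-once loop of A, characterised in closed form
lemma fold_cell (ss : List Int) : ∀ (c : List Int) (k : Int), c.Nodup →
    ss.foldl
      (fun sc s =>
        if s ∉ sc.2 then (sc.1 + 1, sc.2)
        else (sc.1, (PySem.List.remove? sc.2 s).getD sc.2))
      (k, c)
    = (k + (ss.length : Int) - ((c.filter (fun v => decide (v ∈ ss))).length : Int),
       c.filter (fun v => !decide (v ∈ ss))) := by
  induction ss with
  | nil => intro c k hc; simp
  | cons s ss ih =>
    intro c k hc
    rw [List.foldl_cons]
    dsimp only
    by_cases hs : s ∈ c
    · rw [if_neg (not_not_intro hs), PySem.List.remove?_eq_some_erase c s hs,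
        Option.getD_some, ih _ _ (hc.erase s), Prod.mk.injEq]
      have e1 : (c.filter (fun v => decide (v ∈ s :: ss))).length
          = 1 + ((c.erase s).filter (fun v => decide (v ∈ ss))).length := by
        rw [((List.perm_cons_erase hs).filter _).length_eq]
        have e0 : (c.erase s).filter (fun v => decide (v ∈ s :: ss))
            = (c.erase s).filter (fun v => decide (v ∈ ss)) := by
          apply List.filter_congr
          intro v hv
          have hne : v ≠ s := ((hc.mem_erase_iff).mp hv).1
          simp [hne]
        rw [List.filter_cons, if_pos (by simp : decide (s ∈ s :: ss) = true), List.length_cons, e0]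
        omega
      constructor
      · rw [e1, List.length_cons]
        push_cast
        ring
      · rw [hc.erase_eq_filter s, List.filter_filter]
        apply List.filter_congr
        intro v _
        by_cases h1 : v = s <;> by_cases h2 : v ∈ ss <;> simp [h1, h2]
    · rw [if_pos hs, ih _ _ hc, Prod.mk.injEq]
      have e1 : c.filter (fun v => decide (v ∈ s :: ss))
          = c.filter (fun v => decide (v ∈ ss)) := by
        apply List.filter_congr
        intro v hv
        have hne : v ≠ s := fun e => hs (e ▸ hv)
        simp [hne]
      have e2 : c.filter (fun v => !decide (v ∈ s :: ss))
          = c.filter (fun v => !decide (v ∈ ss)) := by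
        apply List.filter_congr
        intro v hv
        have hne : v ≠ s := fun e => hs (e ▸ hv)
        simp [hne]
      constructor
      · rw [e1, List.length_cons]
        push_cast
        ring
      · rw [e2]

-- A's per-cell consume-once loop computes score + pvCell
lemma cellA (k a b c : Int) :
    (([a, b, c] : List Int).foldl
      (fun sc s =>
        if s ∉ sc.2 then (sc.1 + 1, sc.2)
        else (sc.1, (PySem.List.remove? sc.2 s).getD sc.2))
      (k, ([1, 2, 3, 4, 5, 6, 7] : List Int))).1
    = k + pvCell a b c := by
  rw [fold_cell _ _ _ (by decide)]
  unfold pvCell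
  simp only [List.length_cons, List.length_nil]
  push_cast
  ring

-- B's candy-count formula computes pvCell
lemma cellB (a b c : Int) :
    (3 : Int) - ((PySem.List.pyRange 1 8 1).map (fun v =>
        if v ∈ ([a, b, c] : List Int) then (1 : Int) else 0)).sum
    = pvCell a b c := by
  have hr : PySem.List.pyRange 1 8 1 = ([1, 2, 3, 4, 5, 6, 7] : List Int) := rfl
  have hm : (([1, 2, 3, 4, 5, 6, 7] : List Int).map (fun v =>
      if v ∈ ([a, b, c] : List Int) then (1 : Int) else 0))
      = (([1, 2, 3, 4, 5, 6, 7] : List Int).map (fun v =>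
        if (fun v => decide (v ∈ ([a, b, c] : List Int))) v = true then (1 : Int) else 0)) := by
    simp
  rw [hr, hm, PySem.List.sum_map_ite_one_zero, List.countP_eq_length_filter]
  rfl

-- A's per-row loop computes score + pvRow
lemma rowA (above row below : List Int) (score : Int) :
    (PySem.List.enumerate row).foldl (fun score ys =>
      if ys.2 = 0 then
        (([PySem.List.pyGetD row (ys.1 - 1) 0,
           PySem.List.pyGetD below ys.1 0,
           PySem.List.pyGetD above ys.1 0] : List Int).foldl
          (fun sc s =>
            if s ∉ sc.2 then (sc.1 + 1, sc.2)
            else (sc.1, (PySem.List.remove? sc.2 s).getD sc.2))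
          (score, ([1, 2, 3, 4, 5, 6, 7] : List Int))).1
      else score) score
    = score + pvRow above row below := by
  have h1 : ∀ (acc : Int) (ys : Int × Int), ys ∈ PySem.List.enumerate row →
      (if ys.2 = 0 then
        (([PySem.List.pyGetD row (ys.1 - 1) 0,
           PySem.List.pyGetD below ys.1 0,
           PySem.List.pyGetD above ys.1 0] : List Int).foldl
          (fun sc s =>
            if s ∉ sc.2 then (sc.1 + 1, sc.2)
            else (sc.1, (PySem.List.remove? sc.2 s).getD sc.2))
          (acc, ([1, 2, 3, 4, 5, 6, 7] : List Int))).1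
      else acc)
      = (if (fun ys : Int × Int => ys.2 == 0) ys = true then
          acc + pvCell (PySem.List.pyGetD row (ys.1 - 1) 0) (PySem.List.pyGetD below ys.1 0)
            (PySem.List.pyGetD above ys.1 0)
        else acc) := by
    intro acc ys _
    by_cases h : ys.2 = 0
    · rw [if_pos h, if_pos (by simpa using h), cellA]
    · rw [if_neg h, if_neg (by simpa using h)]
  rw [PySem.List.foldl_congr_mem _ _ _ _ h1, PySem.List.foldl_if_eq_foldl_filter,
    PySem.List.foldl_add]
  rfl

-- A equals the row-sum over windows ( (k, k+1, k+2) with row k+1)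
lemma A_eq (cake : List (List Int)) :
    calculate_tactical_score cake
    = ((List.range (cake.length - 1)).map (fun k =>
        pvRow (cake.getD k []) (cake.getD (k + 1) []) (cake.getD (k + 2) []))).sum := by
  unfold calculate_tactical_score
  rw [PySem.List.enumerate_eq_map_pyRange (d := []), List.foldl_map]
  simp only [PySem.List.len_eq]
  rcases Nat.eq_zero_or_pos cake.length with h0 | h0
  · rw [PySem.List.pyRange_one_eq_nil (by omega), h0]
    rfl
  · rw [PySem.List.pyRange_one_cons (show (0 : Int) < (cake.length : Int) by exact_mod_cast h0),
      List.foldl_cons]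
    rw [if_neg (by omega : ¬((0 : Int) < 0 ∧ (0 : Int) < (cake.length : Int)))]
    rw [show (0 : Int) + 1 = 1 from rfl]
    have h1 : ∀ (acc x : Int), x ∈ PySem.List.pyRange 1 (cake.length : Int) 1 →
        (if 0 < x ∧ x < (cake.length : Int) then
          (PySem.List.enumerate (PySem.List.pyGetD cake x [])).foldl (fun score ys =>
            if ys.2 = 0 then
              (([PySem.List.pyGetD (PySem.List.pyGetD cake x []) (ys.1 - 1) 0,
                 PySem.List.pyGetD (PySem.List.pyGetD cake (x + 1) []) ys.1 0,
                 PySem.List.pyGetD (PySem.List.pyGetD cake (x - 1) []) ys.1 0] : List Int).foldl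
                (fun sc s =>
                  if s ∉ sc.2 then (sc.1 + 1, sc.2)
                  else (sc.1, (PySem.List.remove? sc.2 s).getD sc.2))
                (score, ([1, 2, 3, 4, 5, 6, 7] : List Int))).1
            else score) acc
        else acc)
        = acc + pvRow (PySem.List.pyGetD cake (x - 1) []) (PySem.List.pyGetD cake x [])
            (PySem.List.pyGetD cake (x + 1) []) := by
      intro acc x hx
      have hx' := PySem.List.mem_pyRange_one.mp hx
      rw [if_pos (⟨by omega, by omega⟩ : (0 : Int) < x ∧ x < (cake.length : Int)), rowA]
    rw [PySem.List.foldl_congr_mem _ _ _ _ h1, PySem.List.foldl_add, zero_add,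
      PySem.List.pyRange_one, List.map_map]
    have hlen : ((cake.length : Int) - 1).toNat = cake.length - 1 := by omega
    rw [hlen]
    apply congrArg
    apply List.map_congr_left
    intro k _
    show pvRow (PySem.List.pyGetD cake ((1 : Int) + k - 1) [])
        (PySem.List.pyGetD cake ((1 : Int) + k) [])
        (PySem.List.pyGetD cake ((1 : Int) + k + 1) []) = _
    rw [show (1 : Int) + k - 1 = ((k : Nat) : Int) by omega,
      show (1 : Int) + k = (((k + 1 : Nat)) : Int) by omega]
    rw [show ((((k + 1 : Nat)) : Int) + 1) = (((k + 2 : Nat)) : Int) by omega]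
    rw [PySem.List.pyGetD_natCast, PySem.List.pyGetD_natCast, PySem.List.pyGetD_natCast]

-- the zip of three consecutive-row views, re-indexed
lemma zip3_eq (cake : List (List Int)) :
    cake.zip ((cake.drop 1).zip (cake.drop 2))
    = (List.range (cake.length - 2)).map (fun k =>
        (cake.getD k [], (cake.getD (k + 1) [], cake.getD (k + 2) []))) := by
  apply List.ext_getElem
  · simp only [List.length_zip, List.length_drop, List.length_map, List.length_range]
    omega
  · intro i h1 h2
    have hi : i < cake.length - 2 := by
      simp only [List.length_zip, List.length_drop] at h1
      omega
    simp only [List.getElem_zip, List.getElem_drop, List.getElem_map, List.getElem_range]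
    rw [List.getD_eq_getElem _ _ (by omega), List.getD_eq_getElem _ _ (by omega),
      List.getD_eq_getElem _ _ (by omega)]
    simp [Nat.add_comm]

-- B equals the row-sum over indices 0..len-3
lemma B_eq (cake : List (List Int)) :
    calculate_tactical_score_alt cake
    = ((List.range (cake.length - 2)).map (fun k =>
        pvRow (cake.getD k []) (cake.getD (k + 1) []) (cake.getD (k + 2) []))).sum := by
  unfold calculate_tactical_score_alt
  rw [PySem.List.slice_from_one,
    show (2 : Int) = ((2 : Nat) : Int) from rfl, PySem.List.slice_from_natCast,
    ← List.drop_one, zip3_eq, List.map_map]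
  apply congrArg
  apply List.map_congr_left
  intro k _
  show (((PySem.List.enumerate (cake.getD (k + 1) [])).filter (fun ys => ys.2 == 0)).map
      (fun ys => (3 : Int) - ((PySem.List.pyRange 1 8 1).map (fun v =>
        if v ∈ ([PySem.List.pyGetD (cake.getD (k + 1) []) (ys.1 - 1) 0,
                 PySem.List.pyGetD (cake.getD (k + 2) []) ys.1 0,
                 PySem.List.pyGetD (cake.getD k []) ys.1 0] : List Int) then (1 : Int)
        else 0)).sum)).sum
    = pvRow (cake.getD k []) (cake.getD (k + 1) []) (cake.getD (k + 2) [])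
  unfold pvRow
  apply congrArg
  apply List.map_congr_left
  intro ys _
  rw [cellB]

-- under Pre_, the last scanned row (which B's windows skip) contributes nothing
lemma last_row_zero (cake : List (List Int)) (hpre : Pre_calculate_tactical_score cake)
    (h2 : 2 ≤ cake.length) :
    pvRow (cake.getD (cake.length - 2) []) (cake.getD (cake.length - 2 + 1) [])
      (cake.getD (cake.length - 2 + 2) []) = 0 := by
  unfold pvRow
  have hf : (PySem.List.enumerate (cake.getD (cake.length - 2 + 1) [])).filter
      (fun ys => ys.2 == 0) = [] := by
    rw [List.filter_eq_nil_iff]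
    intro ys hys
    obtain ⟨k, hk, rfl⟩ := (PySem.List.mem_enumerate_iff _ _ _).mp hys
    simp only [beq_iff_eq]
    intro hzero
    have := hpre (cake.length - 2 + 1) (by omega) (by omega) k hk
      (by rw [List.getD_eq_getElem _ _ hk]; exact hzero)
    omega
  rw [hf]
  rfl

-- ===== VERDICT (by name: the statement is the Claim_ definition above) =====
theorem calculate_tactical_score_spec : Claim_equal_calculate_tactical_score := by
  intro cake _ hpre
  unfold Spec_calculate_tactical_score
  rw [A_eq, B_eq]
  rcases Nat.lt_or_ge cake.length 2 with h2 | h2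
  · have : cake.length - 1 = cake.length - 2 := by omega
    rw [this]
  · have : cake.length - 1 = (cake.length - 2) + 1 := by omega
    rw [this, List.range_succ, List.map_append, List.sum_append, List.map_singleton,
      List.sum_singleton, last_row_zero cake hpre h2, add_zero]

def calculate_tactical_score_raises : Claim_raises_calculate_tactical_score := by
  unfold Claim_raises_calculate_tactical_score
  exact ⟨by
    intro cake _ hr hpre
    obtain ⟨hn, hmem, _⟩ := hr
    obtain ⟨i, hi, hei⟩ := List.getElem_of_mem hmem
    have := hpre (cake.length - 1) (by omega) (by omega) i hi
      (by rw [List.getD_eq_getElem _ _ hi]; exact hei)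
    omega, by decide⟩
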